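-- pv_equiv track=rewrite | github.com/jubossc1/EP_NSI | Sujet 22/exercice1.py | liste_puisssances_borne
-- ===== SOURCE A (Python) =====
-- def liste_puissances(a,n):
--     l = [a]
--     for i in range(1,n):
--         num = a
--         for j in range(i):
--             num *= a
--         l.append(num)
--     return l
--
-- def liste_puisssances_borne(a, borne):
--     res = []
--     if a >= 2:
--         l = liste_puissances(a,borne)
--         for element in l:
--             if element < borne:
--                 res.append(element)
--     else:
--         raise IndexError()
--     return res
-- ===== SOURCE B (Python) =====
-- def liste_puisssances_borne(a, borne):
--     if a < 2:
--         raise IndexError()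
--     res = []
--     p = a
--     while p < borne:
--         res.append(p)
--         p *= a
--     return res
-- ===== Notes on version B (the rewrite author's own statement) =====
-- stated objective: faster
-- what changed: Instead of building all 'borne' powers (each recomputed by an inner multiplication loop) and filtering, B multiplies one running power incrementally and stops as soon as it reaches the bound.
import Mathlib
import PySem

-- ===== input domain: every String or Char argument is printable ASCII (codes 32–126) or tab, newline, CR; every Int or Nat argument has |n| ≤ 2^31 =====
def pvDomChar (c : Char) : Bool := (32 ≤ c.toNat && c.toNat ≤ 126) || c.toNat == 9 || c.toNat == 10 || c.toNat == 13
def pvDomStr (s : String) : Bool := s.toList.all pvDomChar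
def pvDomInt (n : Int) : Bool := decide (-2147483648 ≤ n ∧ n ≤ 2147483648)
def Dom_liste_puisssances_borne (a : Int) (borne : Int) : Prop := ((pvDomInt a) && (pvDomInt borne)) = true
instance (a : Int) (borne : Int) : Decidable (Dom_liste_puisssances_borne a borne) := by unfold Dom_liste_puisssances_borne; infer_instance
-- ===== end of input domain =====

-- B replaces A's quadratic build-all-powers-then-filter with one incremental
-- multiplication loop that stops at the bound (objective: faster).

-- ===== PORT A =====
-- l = [a]; for i in range(1, n): num = a; for j in range(i): num *= a; l.append(num)
def pvListePuissances (a n : Int) : List Int :=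
  (PySem.List.pyRange 1 n 1).foldl
    (fun l i => l ++ [(PySem.List.pyRange 0 i 1).foldl (fun num _ => num * a) a]) [a]

-- res = []; if a >= 2: for element in liste_puissances(a, borne): if element < borne: res.append(element)
-- else: raise IndexError()  (the a < 2 branch raises: excluded by Pre_, the port returns [] there)
def liste_puisssances_borne (a : Int) (borne : Int) : List Int :=
  if 2 ≤ a then
    (pvListePuissances a borne).foldl (fun res e => if e < borne then res ++ [e] else res) []
  else []

-- ===== PORT B =====
-- p = a; while p < borne: res.append(p); p *= a
-- Fuel-based rendering of the while loop: each iteration at least doubles p (2 ≤ a),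
-- so (borne - a).toNat + 1 steps always suffice; the fuel only makes the loop total.
def pvPowLoop (a borne : Int) : Nat → Int → List Int
  | 0, _ => []
  | fuel + 1, p => if p < borne then p :: pvPowLoop a borne fuel (p * a) else []

-- if a < 2: raise IndexError()  (excluded by Pre_, the port returns [] there)
def liste_puisssances_borne_alt (a : Int) (borne : Int) : List Int :=
  if a < 2 then [] else pvPowLoop a borne ((borne - a).toNat + 1) a

-- ===== PRECONDITION & SPEC =====
-- Python A (and B) raise IndexError when a < 2; Pre_ admits exactly the inputs where A returns.
def Pre_liste_puisssances_borne (a : Int) (borne : Int) : Prop := 2 ≤ a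
instance (a : Int) (borne : Int) : Decidable (Pre_liste_puisssances_borne a borne) := by
  unfold Pre_liste_puisssances_borne; infer_instance
def pvWitness_liste_puisssances_borne : Int × Int := (2, 10)

def Spec_liste_puisssances_borne (a : Int) (borne : Int) (out : List Int) : Prop := out = liste_puisssances_borne_alt a borne
instance (a : Int) (borne : Int) (out : List Int) : Decidable (Spec_liste_puisssances_borne a borne out) := by unfold Spec_liste_puisssances_borne; infer_instance

-- ===== CLAIM (what is proved, stated in full; the proofs are below) =====
def Claim_equal_liste_puisssances_borne : Prop := ∀ (a : Int) (borne : Int), Dom_liste_puisssances_borne a borne → Pre_liste_puisssances_borne a borne → Spec_liste_puisssances_borne a borne (liste_puisssances_borne a borne)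

-- ===== LEMMAS AND PROOFS =====

-- the inner 'for j in range(i): num *= a' loop is repeated multiplication
theorem pvFoldMul (a x : Int) (l : List Int) :
    l.foldl (fun num _ => num * a) x = x * a ^ l.length := by
  induction l generalizing x with
  | nil => simp
  | cons y t ih => simp [List.foldl, ih, pow_succ]; ring

theorem pvInner (a i : Int) (hi : 0 ≤ i) :
    (PySem.List.pyRange 0 i 1).foldl (fun num _ => num * a) a = a ^ (i.toNat + 1) := by
  rw [pvFoldMul, PySem.List.length_pyRange_one]
  have h0 : (i - 0).toNat = i.toNat := by omega
  rw [h0, pow_succ]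
  ring

theorem pvListePuissances_eq (a n : Int) :
    pvListePuissances a n = (List.range ((n - 1).toNat + 1)).map (fun k => a ^ (k + 1)) := by
  unfold pvListePuissances
  rw [PySem.List.foldl_append_singleton_eq_map, PySem.List.pyRange_one, List.map_map,
      List.range_succ_eq_map, List.map_cons, List.map_map, List.singleton_append]
  congr 1
  · simp
  · apply List.map_congr_left
    intro k hk
    simp only [Function.comp]
    rw [pvInner a (1 + k) (by positivity)]
    congr 1
    omega

theorem pvFilterLoop (a borne : Int) (ha : 2 ≤ a) :
    ∀ (m : ℕ) (s fuel : ℕ), 1 ≤ s → borne ≤ a ^ (s + m) → borne ≤ a ^ (s + fuel) →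
    ((List.range m).map (fun k => a ^ (k + s))).filter (fun x => decide (x < borne))
      = pvPowLoop a borne fuel (a ^ s) := by
  intro m
  induction m with
  | zero =>
    intro s fuel _ hb _
    simp only [add_zero] at hb
    cases fuel with
    | zero => simp [pvPowLoop]
    | succ f =>
      rw [pvPowLoop, if_neg (by omega)]
      simp
  | succ m ih =>
    intro s fuel hs hb hbf
    rw [List.range_succ_eq_map]
    simp only [List.map_cons, List.map_map, zero_add]
    by_cases hlt : a ^ s < borne
    · -- the loop takes this element; in particular fuel ≠ 0, else borne ≤ a ^ s
      cases fuel with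
      | zero =>
        exfalso
        simp only [add_zero] at hbf
        omega
      | succ f =>
        rw [pvPowLoop, if_pos hlt]
        rw [List.filter_cons_of_pos (by simpa using hlt)]
        congr 1
        rw [← pow_succ]
        have heq : ((List.range m).map ((fun k => a ^ (k + s)) ∘ (fun x => x + 1)))
            = (List.range m).map (fun k => a ^ (k + (s + 1))) := by
          apply List.map_congr_left; intro k _
          simp only [Function.comp]
          congr 1
          omega
        rw [heq, ih (s + 1) f (by omega)
              (by rw [show s + 1 + m = s + (m + 1) by omega]; exact hb)
              (by rw [show s + 1 + f = s + (f + 1) by omega]; exact hbf)]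
    · -- a ^ s already reaches the bound: the loop stops and the filter keeps nothing
      have hstop : pvPowLoop a borne fuel (a ^ s) = [] := by
        cases fuel with
        | zero => simp [pvPowLoop]
        | succ f => rw [pvPowLoop, if_neg hlt]
      rw [hstop]
      rw [List.filter_cons_of_neg (by simpa using hlt)]
      rw [List.filter_eq_nil_iff]
      intro x hx
      simp only [List.mem_map, List.mem_range, Function.comp] at hx
      obtain ⟨k, _, rfl⟩ := hx
      simp only [decide_eq_true_eq, not_lt] at *
      calc borne ≤ a ^ s := hlt
        _ ≤ a ^ (k + 1 + s) := pow_le_pow_right₀ (by omega) (by omega)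

-- borne ≤ a ^ ((borne-1).toNat + 2) for 2 ≤ a (the A-side list is long enough)
theorem pvBoundPow (a borne : Int) (ha : 2 ≤ a) :
    borne ≤ a ^ ((borne - 1).toNat + 2) := by
  set m : ℕ := (borne - 1).toNat + 2 with hm
  have h1 : (m : Int) < 2 ^ m := by
    have := Nat.lt_two_pow_self (n := m)
    exact_mod_cast this
  have h2 : (2 : Int) ^ m ≤ a ^ m := pow_le_pow_left₀ (by omega) ha m
  have h3 : borne ≤ (m : Int) := by omega
  omega

-- borne ≤ a ^ ((borne-a).toNat + 2) for 2 ≤ a (the B-side fuel is enough)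
theorem pvBoundFuel (a borne : Int) (ha : 2 ≤ a) :
    borne ≤ a ^ ((borne - a).toNat + 2) := by
  set k : ℕ := (borne - a).toNat with hk
  have h1 : (k : Int) + 1 ≤ a ^ k := by
    have hn : (k : Int) < 2 ^ k := by
      have := Nat.lt_two_pow_self (n := k)
      exact_mod_cast this
    have h2 : (2 : Int) ^ k ≤ a ^ k := pow_le_pow_left₀ (by omega) ha k
    omega
  have h4 : a ^ (k + 2) = a ^ k * (a * a) := by ring
  have h5 : (k : Int) ≥ 0 := by positivity
  have hb : borne ≤ a + k := by omega
  have hA : ((k : Int) + 1) * (a * a) ≤ a ^ k * (a * a) :=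
    mul_le_mul_of_nonneg_right h1 (by positivity)
  have hB : a + (k : Int) ≤ ((k : Int) + 1) * (a * a) := by
    have e1 : 0 ≤ (k : Int) * (a * a - 1) := mul_nonneg h5 (by nlinarith)
    have e2 : 0 ≤ a * (a - 1) := by nlinarith
    have e3 : ((k : Int) + 1) * (a * a)
        = (k : Int) * (a * a - 1) + a * (a - 1) + (a + (k : Int)) := by ring
    linarith
  calc borne ≤ a + (k : Int) := hb
    _ ≤ ((k : Int) + 1) * (a * a) := hB
    _ ≤ a ^ k * (a * a) := hA
    _ = a ^ (k + 2) := h4.symm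

-- ===== VERDICT (by name: the statement is the Claim_ definition above) =====
theorem liste_puisssances_borne_spec : Claim_equal_liste_puisssances_borne := by
  intro a borne _ hpre
  unfold Spec_liste_puisssances_borne liste_puisssances_borne liste_puisssances_borne_alt
  have ha : 2 ≤ a := hpre
  rw [if_pos ha, if_neg (by omega)]
  rw [pvListePuissances_eq]
  rw [PySem.List.foldl_append_ite_eq_filter]
  rw [List.nil_append]
  have h := pvFilterLoop a borne ha ((borne - 1).toNat + 1) 1 ((borne - a).toNat + 1)
    (by omega)
    (by rw [show 1 + ((borne - 1).toNat + 1) = (borne - 1).toNat + 2 by omega]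
        exact pvBoundPow a borne ha)
    (by rw [show 1 + ((borne - a).toNat + 1) = (borne - a).toNat + 2 by omega]
        exact pvBoundFuel a borne ha)
  rw [h, pow_one]
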